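-- pv_equiv track=rewrite | github.com/lesgreed/Script_2.0 | Main.py | find_transitions
-- ===== SOURCE A (Python) =====
-- def find_transitions(arr):
--     start_indices = []
--     end_indices = []
--
--     for i in range(len(arr) - 1):
--         if arr[i] >= 1 and arr[i+1] < 1:
--             start_indices.append(i+1)
--         elif arr[i] < 1 and arr[i+1] >= 1:
--             end_indices.append(i+1)
--
--     return start_indices, end_indices
-- ===== SOURCE B (Python) =====
-- from itertools import groupby
--
-- def find_transitions(arr):
--     start_indices = []
--     end_indices = []
--     idx = 0
--     prev = None
--     for key, grp in groupby(arr, key=lambda x: x >= 1):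
--         if prev is True and not key:
--             start_indices.append(idx)
--         elif prev is False and key:
--             end_indices.append(idx)
--         idx += sum(1 for _ in grp)
--         prev = key
--     return start_indices, end_indices
-- ===== Notes on version B (the rewrite author's own statement) =====
-- stated objective: alternative
-- what changed: Replaced the pairwise index scan over arr[i], arr[i+1] with an itertools.groupby pass that splits arr into maximal runs keyed by (x >= 1) and emits one boundary index per run transition, tracking a cumulative run-length counter.
import Mathlib
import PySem

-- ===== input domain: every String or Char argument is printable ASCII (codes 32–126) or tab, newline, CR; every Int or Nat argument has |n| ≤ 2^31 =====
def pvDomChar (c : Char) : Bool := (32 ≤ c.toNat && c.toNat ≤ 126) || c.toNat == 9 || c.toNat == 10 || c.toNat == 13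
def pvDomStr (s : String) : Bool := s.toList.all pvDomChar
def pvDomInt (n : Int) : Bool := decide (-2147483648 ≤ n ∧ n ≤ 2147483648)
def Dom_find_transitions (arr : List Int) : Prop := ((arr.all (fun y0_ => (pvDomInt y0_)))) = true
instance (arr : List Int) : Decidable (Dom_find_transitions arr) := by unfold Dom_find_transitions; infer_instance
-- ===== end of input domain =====

-- B replaces A's pairwise index scan with a groupby-style pass over maximal runs keyed by (x >= 1); alternative decomposition, same cost.

-- ===== PORT A =====
def pvBodyA (arr : List Int) (st : List Int × List Int) (i : Int) : List Int × List Int :=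
  match PySem.List.pyGet? arr i, PySem.List.pyGet? arr (i + 1) with
  | some a, some b =>
    if a ≥ 1 ∧ b < 1 then (st.1 ++ [i + 1], st.2)
    else if a < 1 ∧ b ≥ 1 then (st.1, st.2 ++ [i + 1])
    else st
  | _, _ => st

def find_transitions (arr : List Int) : List Int × List Int :=
  (PySem.List.pyRange 0 ((arr.length : Int) - 1) 1).foldl (pvBodyA arr) ([], [])

-- ===== PORT B =====
-- itertools.groupby(arr, key = fun x => x >= 1): the maximal runs, each with its key
def pvRuns : List Int → List (Bool × List Int)
  | [] => []
  | x :: xs =>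
    (decide (1 ≤ x), x :: xs.takeWhile (fun y => decide (1 ≤ y) == decide (1 ≤ x))) ::
      pvRuns (xs.dropWhile (fun y => decide (1 ≤ y) == decide (1 ≤ x)))
termination_by l => l.length
decreasing_by
  simp only [List.length_cons]
  have := List.length_dropWhile_le (fun y => decide (1 ≤ y) == decide (1 ≤ x)) xs
  omega

def pvStep (st : List Int × List Int × Int × Option Bool) (r : Bool × List Int) :
    List Int × List Int × Int × Option Bool :=
  let se : List Int × List Int :=
    match st.2.2.2 with
    | some true => if r.1 = false then (st.1 ++ [st.2.2.1], st.2.1) else (st.1, st.2.1)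
    | some false => if r.1 = true then (st.1, st.2.1 ++ [st.2.2.1]) else (st.1, st.2.1)
    | none => (st.1, st.2.1)
  (se.1, se.2, st.2.2.1 + (r.2.length : Int), some r.1)

def find_transitions_alt (arr : List Int) : List Int × List Int :=
  let res := (pvRuns arr).foldl pvStep ([], [], 0, none)
  (res.1, res.2.1)

-- ===== PRECONDITION & SPEC =====
def Spec_find_transitions (arr : List Int) (out : List Int × List Int) : Prop := out = find_transitions_alt arr
instance (arr : List Int) (out : List Int × List Int) : Decidable (Spec_find_transitions arr out) := by unfold Spec_find_transitions; infer_instance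

-- ===== CLAIM (what is proved, stated in full; the proofs are below) =====
def Claim_equal_find_transitions : Prop := ∀ (arr : List Int), Dom_find_transitions arr → Spec_find_transitions arr (find_transitions arr)

-- ===== LEMMAS AND PROOFS =====

-- reference: transitions of l at running index i, given the key k of the element just before l
def pvTrans (k : Bool) (i : Int) : List Int → List Int × List Int
  | [] => ([], [])
  | y :: ys =>
    let r := pvTrans (decide (1 ≤ y)) (i + 1) ys
    if k = true ∧ decide (1 ≤ y) = false then (i :: r.1, r.2)
    else if k = false ∧ decide (1 ≤ y) = true then (r.1, i :: r.2)
    else r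

-- key of the last element of l (k if l is empty)
def pvLKey (k : Bool) : List Int → Bool
  | [] => k
  | y :: ys => pvLKey (decide (1 ≤ y)) ys

lemma pvTrans_skip (k : Bool) :
    ∀ (g : List Int) (i : Int) (rest : List Int), (∀ y ∈ g, decide (1 ≤ y) = k) →
      pvTrans k i (g ++ rest) = pvTrans k (i + g.length) rest := by
  intro g
  induction g with
  | nil => intro i rest _; simp
  | cons y g ih =>
    intro i rest h
    have hy : decide (1 ≤ y) = k := h y (by simp)
    have hg : ∀ z ∈ g, decide (1 ≤ z) = k := fun z hz => h z (by simp [hz])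
    simp only [List.cons_append, pvTrans, hy, ih (i + 1) rest hg, List.length_cons]
    cases k <;> simp <;> ring_nf

lemma pvLKey_append (g rest : List Int) : ∀ k, pvLKey k (g ++ rest) = pvLKey (pvLKey k g) rest := by
  induction g with
  | nil => intro k; simp [pvLKey]
  | cons y g ih => intro k; simp [pvLKey, ih]

lemma pvLKey_const (k : Bool) : ∀ (g : List Int), (∀ y ∈ g, decide (1 ≤ y) = k) → pvLKey k g = k := by
  intro g
  induction g with
  | nil => intro _; rfl
  | cons y g ih =>
    intro h
    have hy : decide (1 ≤ y) = k := h y (by simp)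
    simp [pvLKey, hy, ih (fun z hz => h z (by simp [hz]))]

lemma pvGo : ∀ (l : List Int) (k : Bool) (i : Int) (s e : List Int),
    (pvRuns l).foldl pvStep (s, e, i, some k) =
      (s ++ (pvTrans k i l).1, e ++ (pvTrans k i l).2, i + l.length, some (pvLKey k l)) := by
  intro l
  induction l using pvRuns.induct with
  | case1 => intro k i s e; simp [pvRuns, pvTrans, pvLKey]
  | case2 x xs ih =>
    intro k i s e
    set k' := decide (1 ≤ x) with hk'
    set g := xs.takeWhile (fun y => decide (1 ≤ y) == k') with hg
    set rest := xs.dropWhile (fun y => decide (1 ≤ y) == k') with hrest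
    have hsplit : xs = g ++ rest := (List.takeWhile_append_dropWhile).symm
    have hgk : ∀ y ∈ g, decide (1 ≤ y) = k' := by
      intro y hy
      have := List.mem_takeWhile_imp hy
      simpa using this
    have hskip : pvTrans k' (i + 1) xs = pvTrans k' (i + 1 + g.length) rest := by
      rw [hsplit]; exact pvTrans_skip k' g (i + 1) rest hgk
    have hlkey : pvLKey k (x :: xs) = pvLKey k' rest := by
      simp only [pvLKey, ← hk']
      rw [hsplit, pvLKey_append, pvLKey_const k' g hgk]
    have hlen : (xs.length : Int) = g.length + rest.length := by
      rw [hsplit]; push_cast [List.length_append]; ring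
    rw [show pvRuns (x :: xs) = (k', x :: g) :: pvRuns rest from by rw [pvRuns]]
    simp only [List.foldl_cons]
    rw [show pvStep (s, e, i, some k) (k', x :: g) =
        ((if k = true ∧ k' = false then s ++ [i] else s),
         (if k = false ∧ k' = true then e ++ [i] else e),
         i + (1 + g.length : Int), some k') from by
      simp only [pvStep, List.length_cons]
      cases k <;> cases k' <;> simp <;> ring]
    rw [ih]
    have htr : pvTrans k i (x :: xs) =
        (if k = true ∧ k' = false then (i :: (pvTrans k' (i + 1 + g.length) rest).1,
            (pvTrans k' (i + 1 + g.length) rest).2)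
         else if k = false ∧ k' = true then ((pvTrans k' (i + 1 + g.length) rest).1,
            i :: (pvTrans k' (i + 1 + g.length) rest).2)
         else pvTrans k' (i + 1 + g.length) rest) := by
      simp only [pvTrans, ← hk', hskip]
    rw [htr, hlkey]
    have hidx : i + (1 + (g.length : Int)) + (rest.length : Int) = i + ((x :: xs).length : Int) := by
      simp only [List.length_cons]; push_cast [hlen]; ring
    cases k <;> cases k' <;> simp [hidx] <;> ring_nf <;> simp [List.append_assoc]

lemma B_eq (arr : List Int) : find_transitions_alt arr =
    (match arr with
     | [] => ([], [])
     | x :: xs => pvTrans (decide (1 ≤ x)) 1 xs) := by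
  cases arr with
  | nil => simp [find_transitions_alt, pvRuns]
  | cons x xs =>
    set k' := decide (1 ≤ x) with hk'
    set g := xs.takeWhile (fun y => decide (1 ≤ y) == k') with hg
    set rest := xs.dropWhile (fun y => decide (1 ≤ y) == k') with hrest
    have hsplit : xs = g ++ rest := (List.takeWhile_append_dropWhile).symm
    have hgk : ∀ y ∈ g, decide (1 ≤ y) = k' := by
      intro y hy; have := List.mem_takeWhile_imp hy; simpa using this
    have hskip : pvTrans k' 1 xs = pvTrans k' (1 + g.length) rest := by
      rw [hsplit]; exact pvTrans_skip k' g 1 rest hgk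
    show (((pvRuns (x :: xs)).foldl pvStep ([], [], 0, none)).1,
          ((pvRuns (x :: xs)).foldl pvStep ([], [], 0, none)).2.1) = _
    rw [show pvRuns (x :: xs) = (k', x :: g) :: pvRuns rest from by rw [pvRuns]]
    simp only [List.foldl_cons]
    rw [show pvStep ([], [], 0, none) (k', x :: g) =
        (([] : List Int), ([] : List Int), (1 + g.length : Int), some k') from by
      simp only [pvStep, List.length_cons]; norm_num; omega]
    rw [pvGo, hskip]
    simp

lemma A_loop (arr : List Int) : ∀ (l : List Int) (a : Nat), arr.drop a = l → ∀ (s e : List Int),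
    (PySem.List.pyRange (a : Int) ((arr.length : Int) - 1) 1).foldl (pvBodyA arr) (s, e) =
      (match l with
       | [] => (s, e)
       | x :: xs => (s ++ (pvTrans (decide (1 ≤ x)) ((a : Int) + 1) xs).1,
                     e ++ (pvTrans (decide (1 ≤ x)) ((a : Int) + 1) xs).2)) := by
  intro l
  induction l with
  | nil =>
    intro a hdrop s e
    have hle : arr.length ≤ a := by
      have := congrArg List.length hdrop; simp at this; omega
    rw [PySem.List.pyRange_one_eq_nil (by push_cast; omega)]
    rfl
  | cons x xs ih =>
    intro a hdrop s e
    have hx : arr[a]? = some x := by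
      have : (arr.drop a)[0]? = some x := by rw [hdrop]; rfl
      simpa using this
    cases xs with
    | nil =>
      have hlen : arr.length = a + 1 := by
        have := congrArg List.length hdrop; simp at this; omega
      rw [PySem.List.pyRange_one_eq_nil (by push_cast [hlen]; omega)]
      simp [pvTrans]
    | cons y rest =>
      have hlen : arr.length = a + 2 + rest.length := by
        have := congrArg List.length hdrop; simp at this; omega
      have hy : arr[a + 1]? = some y := by
        have : (arr.drop a)[1]? = some y := by rw [hdrop]; rfl
        simpa [Nat.add_comm] using this
      have hdrop' : arr.drop (a + 1) = y :: rest := by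
        have : (arr.drop a).drop 1 = arr.drop (a + 1) := by
          rw [List.drop_drop]
        rw [← this, hdrop]; rfl
      rw [PySem.List.pyRange_one_cons (by push_cast [hlen]; omega)]
      simp only [List.foldl_cons]
      have hbody : pvBodyA arr (s, e) (a : Int) =
          ((if x ≥ 1 ∧ y < 1 then s ++ [(a : Int) + 1] else s),
           (if x < 1 ∧ y ≥ 1 then e ++ [(a : Int) + 1] else e)) := by
        simp only [pvBodyA]
        rw [show ((a : Int) + 1) = ((a + 1 : Nat) : Int) from by push_cast; ring]
        rw [PySem.List.pyGet?_natCast, PySem.List.pyGet?_natCast, hx, hy]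
        by_cases h1 : (1:Int) ≤ x <;> by_cases h2 : (1:Int) ≤ y <;>
          simp [h1, h2, show ∀ z : Int, z < 1 ↔ ¬ (1 ≤ z) from fun z => by omega]
      rw [hbody]
      rw [show ((a : Int) + 1) = ((a + 1 : Nat) : Int) from by push_cast; ring]
      rw [ih (a + 1) hdrop']
      have hT : pvTrans (decide (1 ≤ x)) ((a : Int) + 1) (y :: rest) =
          (let r := pvTrans (decide (1 ≤ y)) ((a : Int) + 2) rest
           if decide (1 ≤ x) = true ∧ decide (1 ≤ y) = false then (((a : Int) + 1) :: r.1, r.2)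
           else if decide (1 ≤ x) = false ∧ decide (1 ≤ y) = true then (r.1, ((a : Int) + 1) :: r.2)
           else r) := by
        simp only [pvTrans]; ring_nf
      push_cast
      rw [show ((a : Int) + 1 + 1) = (a : Int) + 2 from by ring, hT]
      by_cases h1 : (1:Int) ≤ x <;> by_cases h2 : (1:Int) ≤ y <;>
        simp [h1, h2, show ∀ z : Int, z < 1 ↔ ¬ (1 ≤ z) from fun z => by omega,
          List.append_assoc]

lemma A_eq (arr : List Int) : find_transitions arr =
    (match arr with
     | [] => ([], [])
     | x :: xs => pvTrans (decide (1 ≤ x)) 1 xs) := by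
  have h := A_loop arr arr 0 rfl [] []
  simp only [Nat.cast_zero] at h
  cases arr with
  | nil => rfl
  | cons x xs =>
    unfold find_transitions
    rw [h]
    norm_num

-- ===== VERDICT (by name: the statement is the Claim_ definition above) =====
theorem find_transitions_spec : Claim_equal_find_transitions := by
  intro arr _
  unfold Spec_find_transitions
  rw [A_eq, B_eq]
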